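-- pv_equiv track=rewrite | github.com/piotrmiskiewicz/kyma-environment-broker | scripts/python/generate_values_doc.py | soft_break
-- ===== SOURCE A (Python) =====
-- def soft_break(text, min_len=20, prefer_chars=('.', '_')):
--     """
--     Insert a <br> after every '.' or '_' that appears after each min_len characters.
--     For each segment of min_len, if a '.' or '_' is found after that point, break after it and continue.
--     If no such character is found after min_len, search backward in the last min_len segment for the last '.' or '_'.
--     If still not found, do not break and append the rest as is.
--     """
--     if not text or len(text) <= min_len:
--         return text
--     result = ''
--     start = 0
--     while start < len(text):
--         if len(text) - start <= min_len:
--             result += text[start:]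
--             break
--         # Search forward for next break char after min_len
--         forward_idxs = [text.find(c, start + min_len) for c in prefer_chars]
--         forward_idxs = [i for i in forward_idxs if i != -1]
--         if forward_idxs:
--             idx = min(forward_idxs)
--             result += text[start:idx+1] + '<br>'
--             start = idx+1
--             continue
--         # Search backward in the last min_len segment for the last break char
--         segment = text[start:start+min_len]
--         last_idx = -1
--         for c in prefer_chars:
--             idx = segment.rfind(c)
--             if idx > last_idx:
--                 last_idx = idx
--         if last_idx != -1:
--             result += text[start:start+last_idx+1] + '<br>'
--             start = start+last_idx+1
--             continue
--         # No break char found, append the rest and break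
--         result += text[start:]
--         break
--     return result
-- ===== SOURCE B (Python) =====
-- from bisect import bisect_left, bisect_right
--
-- def soft_break(text, min_len=20, prefer_chars=('.', '_')):
--     n = len(text)
--     if not text or n <= min_len:
--         return text
--     # one scan per distinct break string: all occurrence start positions, ascending
--     cache = {}
--     occs = []
--     for c in prefer_chars:
--         if c in cache:
--             occ = cache[c]
--         else:
--             occ = []
--             if len(c) <= n:
--                 p = text.find(c)
--                 while p != -1:
--                     occ.append(p)
--                     p = text.find(c, p + 1)
--             cache[c] = occ
--         occs.append((len(c), occ))
--     # break strings that never occur contribute nothing: drop their entries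
--     occs = [e for e in occs if e[1]]
--     pieces = []
--     start = 0
--     while start < n:
--         if n - start <= min_len:
--             pieces.append(text[start:])
--             break
--         bound = start + min_len
--         # first occurrence (of any break string) at position >= bound
--         fwd = n + 1
--         for _, occ in occs:
--             j = bisect_left(occ, bound)
--             if j < len(occ) and occ[j] < fwd:
--                 fwd = occ[j]
--         if fwd <= n:
--             pieces.append(text[start:fwd + 1])
--             pieces.append('<br>')
--             start = fwd + 1
--             continue
--         # last occurrence fitting wholly inside text[start:bound]
--         back = -1
--         for lc, occ in occs:
--             j = bisect_right(occ, bound - lc) - 1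
--             if j >= 0 and occ[j] >= start and occ[j] > back:
--                 back = occ[j]
--         if back != -1:
--             pieces.append(text[start:back + 1])
--             pieces.append('<br>')
--             start = back + 1
--             continue
--         pieces.append(text[start:])
--         break
--     return ''.join(pieces)
-- ===== Notes on version B (the rewrite author's own statement) =====
-- stated objective: alternative
-- what changed: B precomputes the sorted list of occurrence positions of every break string once and replaces A's repeated text.find/segment.rfind scans inside the while loop by bisect lookups into those lists, collecting the output pieces in a list joined at the end instead of string concatenation.
-- outside the precondition, e.g. on soft_break('ab', -1, ('', 'a')): A returns 'ab<br>', B does not finish within the time limit; on soft_break('abc', -5, ('.',)): A returns 'abc', B returns 'abc'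
import Mathlib
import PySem

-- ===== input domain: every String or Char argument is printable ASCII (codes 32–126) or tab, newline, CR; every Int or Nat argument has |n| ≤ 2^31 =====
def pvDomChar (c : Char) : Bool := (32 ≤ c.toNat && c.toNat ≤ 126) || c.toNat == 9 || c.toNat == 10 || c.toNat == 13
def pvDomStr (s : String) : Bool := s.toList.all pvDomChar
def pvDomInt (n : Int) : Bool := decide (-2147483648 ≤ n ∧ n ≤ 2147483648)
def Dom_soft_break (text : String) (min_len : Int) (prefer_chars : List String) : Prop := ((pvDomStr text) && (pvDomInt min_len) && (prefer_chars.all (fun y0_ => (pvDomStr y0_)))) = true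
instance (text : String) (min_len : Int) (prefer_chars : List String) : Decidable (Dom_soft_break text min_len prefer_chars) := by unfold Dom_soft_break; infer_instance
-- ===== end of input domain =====

-- B re-implements soft_break by precomputing the sorted occurrence positions of every break
-- string once and looking them up with bisect in the loop, collecting pieces joined at the end
-- (alternative structure, same return value).

def pvBr : List Char := ['<', 'b', 'r', '>']

-- ===== PORT A =====
-- min(forward_idxs) of A: [text.find(c, start+min_len) for c in prefer_chars], filtered ≠ -1,
-- none when that list is empty
def sbMinFwd (t : List Char) (ml : Int) (pcs : List (List Char)) (start : Int) : Option Int :=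
  PySem.List.min?
    ((pcs.map (fun c => PySem.Chars.findFrom t c (start + ml))).filter (fun i => i ≠ -1))
    (fun i => i)

-- A's backward scan: last_idx over segment.rfind(c) for c in prefer_chars
def sbSegLast (t : List Char) (ml : Int) (pcs : List (List Char)) (start : Int) : Int :=
  let segment := PySem.Chars.slice t (some start) (some (start + ml))
  pcs.foldl (fun li c => let i := PySem.Chars.rfind segment c; if li < i then i else li) (-1)

-- the while loop of A; fuel = len(text)+1 bounds the iterations (inside Pre_, start grows by
-- at least 1 per iteration and the loop stops at start ≥ len(text))
def sbLoopA (t : List Char) (ml : Int) (pcs : List (List Char)) : Nat → Int → List Char → List Char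
  | 0, _, result => result
  | fuel+1, start, result =>
    if start < (t.length : Int) then
      if (t.length : Int) - start ≤ ml then
        result ++ PySem.Chars.slice t (some start) none
      else
        match sbMinFwd t ml pcs start with
        | some idx =>
            sbLoopA t ml pcs fuel (idx + 1)
              (result ++ PySem.Chars.slice t (some start) (some (idx + 1)) ++ pvBr)
        | none =>
            let lastIdx := sbSegLast t ml pcs start
            if lastIdx ≠ -1 then
              sbLoopA t ml pcs fuel (start + lastIdx + 1)
                (result ++ PySem.Chars.slice t (some start) (some (start + lastIdx + 1)) ++ pvBr)
            else
              result ++ PySem.Chars.slice t (some start) none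
    else result

def soft_break (text : String) (min_len : Int) (prefer_chars : List String) : String :=
  if text.toList.length = 0 ∨ (text.toList.length : Int) ≤ min_len then text
  else
    String.ofList
      (sbLoopA text.toList min_len (prefer_chars.map String.toList) (text.toList.length + 1) 0 [])

-- ===== PORT B =====
-- the scan "p = text.find(c); while p != -1: occ.append(p); p = text.find(c, p+1)";
-- fuel = len(t)+2 bounds the iterations (positions strictly increase, at most len+1 of them)
def sbOccGo (t c : List Char) : Nat → Int → List Int
  | 0, _ => []
  | fuel+1, p =>
    if p ≠ -1 then p :: sbOccGo t c fuel (PySem.Chars.findFrom t c (p + 1)) else []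

-- occurrence start positions of c in t, ascending (the "if len(c) <= n: scan" branch;
-- [] for a break string longer than the text)
def sbOcc (t : List Char) (c : List Char) : List Int :=
  if c.length ≤ t.length then sbOccGo t c (t.length + 2) (PySem.Chars.findFrom t c 0) else []

-- the cache loop: one scan per distinct break string, occs aligned with prefer_chars
def sbBuildOccs (t : List Char) (pcs : List (List Char)) :
    PySem.Dict (List Char) (List Int) × List (Nat × List Int) :=
  pcs.foldl
    (fun st c =>
      match PySem.Dict.get? st.1 c with
      | some occ => (st.1, st.2 ++ [(c.length, occ)])
      | none =>
          let occ := sbOcc t c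
          (PySem.Dict.insert st.1 c occ, st.2 ++ [(c.length, occ)]))
    (PySem.Dict.empty, [])

-- first occurrence (of any break string) at position ≥ bound, sentinel n+1
def sbFwd (occs : List (Nat × List Int)) (n bound : Int) : Int :=
  occs.foldl
    (fun fwd oc =>
      let j := PySem.List.bisectLeft oc.2 bound
      if j < oc.2.length ∧ oc.2.getD j 0 < fwd then oc.2.getD j 0 else fwd)
    (n + 1)

-- last occurrence fitting wholly inside text[start:bound], sentinel -1
def sbBwd (occs : List (Nat × List Int)) (start bound : Int) : Int :=
  occs.foldl
    (fun back oc =>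
      let j := PySem.List.bisectRight oc.2 (bound - (oc.1 : Int))
      if 1 ≤ j ∧ start ≤ oc.2.getD (j - 1) 0 ∧ back < oc.2.getD (j - 1) 0
      then oc.2.getD (j - 1) 0 else back)
    (-1)

def sbLoopB (t : List Char) (ml : Int) (occs : List (Nat × List Int)) :
    Nat → Int → List (List Char) → List (List Char)
  | 0, _, pieces => pieces
  | fuel+1, start, pieces =>
    if start < (t.length : Int) then
      if (t.length : Int) - start ≤ ml then
        pieces ++ [PySem.Chars.slice t (some start) none]
      else
        if sbFwd occs (t.length : Int) (start + ml) ≤ (t.length : Int) then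
          sbLoopB t ml occs fuel (sbFwd occs (t.length : Int) (start + ml) + 1)
            (pieces ++ [PySem.Chars.slice t (some start) (some (sbFwd occs (t.length : Int) (start + ml) + 1)), pvBr])
        else
          if sbBwd occs start (start + ml) ≠ -1 then
            sbLoopB t ml occs fuel (sbBwd occs start (start + ml) + 1)
              (pieces ++ [PySem.Chars.slice t (some start) (some (sbBwd occs start (start + ml) + 1)), pvBr])
          else
            pieces ++ [PySem.Chars.slice t (some start) none]
    else pieces

def soft_break_alt (text : String) (min_len : Int) (prefer_chars : List String) : String :=
  if text.toList.length = 0 ∨ (text.toList.length : Int) ≤ min_len then text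
  else
    String.ofList (PySem.Chars.join []
      (sbLoopB text.toList min_len
        -- occs = [e for e in occs if e[1]]: drop never-occurring break strings
        ((sbBuildOccs text.toList (prefer_chars.map String.toList)).2.filter
          (fun oc => !oc.2.isEmpty))
        (text.toList.length + 1) 0 []))

-- ===== PRECONDITION & SPEC =====
-- Pre_ excludes negative min_len, on which A's text.find(c, start+min_len) start wraps to the
-- string head and A loops forever whenever a break string occurs early in the text.
def Pre_soft_break (text : String) (min_len : Int) (prefer_chars : List String) : Prop :=
  0 ≤ min_len

instance (text : String) (min_len : Int) (prefer_chars : List String) : Decidable (Pre_soft_break text min_len prefer_chars) := by unfold Pre_soft_break; infer_instance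

def pvWitness_soft_break : String × Int × List String := ("abc.def_ghij", 3, [".", "_"])

def Spec_soft_break (text : String) (min_len : Int) (prefer_chars : List String) (out : String) : Prop := out = soft_break_alt text min_len prefer_chars
instance (text : String) (min_len : Int) (prefer_chars : List String) (out : String) : Decidable (Spec_soft_break text min_len prefer_chars out) := by unfold Spec_soft_break; infer_instance

-- ===== CLAIM (what is proved, stated in full; the proofs are below) =====
def Claim_equal_soft_break : Prop := ∀ (text : String) (min_len : Int) (prefer_chars : List String), Dom_soft_break text min_len prefer_chars → Pre_soft_break text min_len prefer_chars → Spec_soft_break text min_len prefer_chars (soft_break text min_len prefer_chars)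

-- ===== LEMMAS AND PROOFS =====

-- reference form of the occurrence list (proof-side only): a filtered range
def sbOccSpec (t : List Char) (c : List Char) : List Int :=
  (PySem.List.pyRange 0 ((t.length : Int) - (c.length : Int) + 1)).filter
    (fun p => PySem.Chars.startswith (PySem.Chars.slice t (some p) none) c)

-- membership in the reference occurrence list
lemma mem_sbOccSpec {t c : List Char} {p : Int} :
    p ∈ sbOccSpec t c ↔ 0 ≤ p ∧ p + (c.length : Int) ≤ (t.length : Int) ∧ c <+: t.drop p.toNat := by
  unfold sbOccSpec
  rw [List.mem_filter, PySem.List.mem_pyRange_one]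
  have hb : PySem.Chars.slice t (some p) = PySem.List.slice t (some p) none :=
    PySem.Chars.slice_eq_listSlice t (some p) none
  constructor
  · rintro ⟨⟨h0, hlt⟩, hsw⟩
    rw [PySem.Chars.startswith, hb, PySem.List.slice_from _ h0,
      List.isPrefixOf_iff_prefix] at hsw
    exact ⟨h0, by omega, hsw⟩
  · rintro ⟨h0, hle, hpre⟩
    refine ⟨⟨h0, by omega⟩, ?_⟩
    rw [PySem.Chars.startswith, hb, PySem.List.slice_from _ h0, List.isPrefixOf_iff_prefix]
    exact hpre

-- the reference occurrence list is strictly increasing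
lemma sbOccSpec_pairwise (t c : List Char) : (sbOccSpec t c).Pairwise (· < ·) := by
  unfold sbOccSpec
  apply List.Pairwise.filter
  by_cases h : 0 < (t.length : Int) - (c.length : Int) + 1
  · obtain ⟨m, hm⟩ : ∃ m : Nat, ((t.length : Int) - (c.length : Int) + 1) = (m : Int) :=
      ⟨((t.length : Int) - (c.length : Int) + 1).toNat, by omega⟩
    rw [hm, PySem.List.pyRange_zero_natCast]
    rw [List.pairwise_map]
    exact (List.pairwise_lt_range).imp (by intro a b hab; exact_mod_cast hab)
  · have : PySem.List.pyRange 0 ((t.length : Int) - (c.length : Int) + 1) = [] := by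
      rw [List.eq_nil_iff_forall_not_mem]
      intro x hx
      rw [PySem.List.mem_pyRange_one] at hx
      omega
    rw [this]
    exact List.Pairwise.nil

lemma findFrom_past (t c : List Char) :
    PySem.Chars.findFrom t c ((t.length : Int) + 1) = -1 := by
  simp only [PySem.Chars.findFrom]
  split_ifs <;> omega

-- splitting a sorted list's filter at its least element ≥ k
lemma filter_head_sorted (l : List Int) (hpw : l.Pairwise (· < ·)) (r k : Int) (hr : r ∈ l)
    (hkr : k ≤ r) (hmin : ∀ x ∈ l, k ≤ x → r ≤ x) :
    l.filter (fun p => k ≤ p) = r :: l.filter (fun p => r + 1 ≤ p) := by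
  induction l with
  | nil => cases hr
  | cons x tl ih =>
    rw [List.pairwise_cons] at hpw
    obtain ⟨hx, hpw'⟩ := hpw
    rcases List.mem_cons.mp hr with rfl | hrtl
    · rw [List.filter_cons, if_pos (by simpa using hkr), List.filter_cons,
        if_neg (by simp)]
      congr 1
      apply List.filter_congr
      intro y hy
      have := hx y hy
      simp only [decide_eq_decide]
      omega
    · have hxk : ¬ (k ≤ x) := by
        intro hk
        have := hmin x List.mem_cons_self hk
        have := hx r hrtl
        omega
      have hxr : ¬ (r + 1 ≤ x) := by
        have := hx r hrtl
        omega
      rw [List.filter_cons, if_neg (by simpa using hxk), List.filter_cons,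
        if_neg (by simpa using hxr)]
      exact ih hpw' hrtl (fun y hy hky => hmin y (List.mem_cons_of_mem x hy) hky)

-- the find-scan collects exactly the reference occurrences ≥ k
lemma sbOccGo_eq (t c : List Char) :
    ∀ (fuel k : Nat), k ≤ t.length → t.length + 2 - k ≤ fuel →
      sbOccGo t c fuel (PySem.Chars.findFrom t c (k : Int)) =
        (sbOccSpec t c).filter (fun p => (k : Int) ≤ p) := by
  intro fuel
  induction fuel with
  | zero => intro k hk hf; omega
  | succ fuel ih =>
    intro k hk hf
    by_cases hr : PySem.Chars.findFrom t c (k : Int) = -1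
    · rw [PySem.Chars.findFrom_natCast_eq_neg_one_iff t c k hk] at hr
      simp only [sbOccGo]
      rw [if_neg (by simp [PySem.Chars.findFrom_natCast_eq_neg_one_iff t c k hk, hr])]
      symm
      rw [List.filter_eq_nil_iff]
      intro p hp hkp
      obtain ⟨hp0, hplen, hppre⟩ := mem_sbOccSpec.mp hp
      have hkp' : (k : Int) ≤ p := by simpa using hkp
      apply hr
      rw [← PySem.Chars.isIn_iff_infix, ← PySem.Chars.exists_prefix_drop_iff_isIn]
      refine ⟨p.toNat - k, ?_⟩
      rw [List.drop_drop]
      have : k + (p.toNat - k) = p.toNat := by omega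
      rw [this]
      exact hppre
    · set r := PySem.Chars.findFrom t c (k : Int) with hrdef
      obtain ⟨hkr, hpre, hmin⟩ := PySem.Chars.findFrom_natCast_spec t c k hk hr
      have hrn : r ≤ (t.length : Int) := by
        rw [hrdef, PySem.Chars.findFrom_natCast t c k hk]
        split
        · omega
        · have h1 := PySem.Chars.find_le_length (t.drop k) c
          rw [List.length_drop] at h1
          omega
      have hrmem : r ∈ sbOccSpec t c := by
        rw [mem_sbOccSpec]
        refine ⟨by omega, ?_, hpre⟩
        have := hpre.length_le
        rw [List.length_drop] at this
        omega
      have hminset : ∀ x ∈ sbOccSpec t c, (k : Int) ≤ x → r ≤ x := by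
        intro x hx hkx
        obtain ⟨hx0, hxlen, hxpre⟩ := mem_sbOccSpec.mp hx
        by_contra hlt
        push_neg at hlt
        exact hmin x.toNat (by omega) (by omega) hxpre
      rw [filter_head_sorted (sbOccSpec t c) (sbOccSpec_pairwise t c) r (k : Int)
        hrmem hkr hminset]
      simp only [sbOccGo]
      rw [if_pos (by omega)]
      congr 1
      by_cases hrn2 : r.toNat + 1 ≤ t.length
      · have hcast : r + 1 = ((r.toNat + 1 : Nat) : Int) := by omega
        rw [hcast]
        exact ih (r.toNat + 1) hrn2 (by omega)
      · have hreq : r = (t.length : Int) := by omega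
        rw [hreq, findFrom_past t c]
        obtain ⟨fuel', rfl⟩ : ∃ f', fuel = f' + 1 := ⟨fuel - 1, by omega⟩
        simp only [sbOccGo]
        rw [if_neg (by simp)]
        symm
        rw [List.filter_eq_nil_iff]
        intro p hp hpk
        obtain ⟨hp0, hplen, _⟩ := mem_sbOccSpec.mp hp
        have : (t.length : Int) + 1 ≤ p := by simpa using hpk
        omega

-- the scanned occurrence list equals the reference one
lemma sbOcc_eq_spec (t c : List Char) : sbOcc t c = sbOccSpec t c := by
  unfold sbOcc
  by_cases hc : c.length ≤ t.length
  · rw [if_pos hc]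
    have := sbOccGo_eq t c (t.length + 2) 0 (by omega) (by omega)
    rw [Nat.cast_zero] at this
    rw [this]
    apply List.filter_eq_self.mpr
    intro p hp
    obtain ⟨hp0, _, _⟩ := mem_sbOccSpec.mp hp
    simpa using hp0
  · rw [if_neg hc]
    symm
    rw [List.eq_nil_iff_forall_not_mem]
    intro p hp
    obtain ⟨hp0, hplen, _⟩ := mem_sbOccSpec.mp hp
    omega

lemma mem_sbOcc {t c : List Char} {p : Int} :
    p ∈ sbOcc t c ↔ 0 ≤ p ∧ p + (c.length : Int) ≤ (t.length : Int) ∧ c <+: t.drop p.toNat := by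
  rw [sbOcc_eq_spec]
  exact mem_sbOccSpec

lemma sbOcc_pairwise (t c : List Char) : (sbOcc t c).Pairwise (· < ·) := by
  rw [sbOcc_eq_spec]
  exact sbOccSpec_pairwise t c

-- the cache loop produces the per-string occurrence pairs in order
lemma sbBuildOccs_aux (t : List Char) :
    ∀ (pcs : List (List Char)) (d : PySem.Dict (List Char) (List Int))
      (acc : List (Nat × List Int)),
      (∀ c occ, d.get? c = some occ → occ = sbOcc t c) →
      (pcs.foldl
        (fun st c =>
          match PySem.Dict.get? st.1 c with
          | some occ => (st.1, st.2 ++ [(c.length, occ)])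
          | none =>
              let occ := sbOcc t c
              (PySem.Dict.insert st.1 c occ, st.2 ++ [(c.length, occ)])) (d, acc)).2 =
        acc ++ pcs.map (fun c => (c.length, sbOcc t c)) := by
  intro pcs
  induction pcs with
  | nil => intro d acc _; simp
  | cons c pcs ih =>
    intro d acc hinv
    rw [List.foldl_cons]
    cases hg : d.get? c with
    | some occ =>
      simp only [hg]
      rw [ih d (acc ++ [(c.length, occ)]) hinv, hinv c occ hg]
      simp
    | none =>
      simp only [hg]
      rw [ih (d.insert c (sbOcc t c)) (acc ++ [(c.length, sbOcc t c)]) ?_]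
      · simp
      · intro c' occ' hgc
        by_cases hcc : c' = c
        · subst hcc
          rw [PySem.Dict.get?_insert_self] at hgc
          exact (Option.some.injEq _ _ ▸ hgc).symm
        · rw [PySem.Dict.get?_insert_of_ne d (sbOcc t c) hcc] at hgc
          exact hinv c' occ' hgc

lemma sbBuildOccs_eq (t : List Char) (pcs : List (List Char)) :
    (sbBuildOccs t pcs).2 = pcs.map (fun c => (c.length, sbOcc t c)) := by
  unfold sbBuildOccs
  rw [sbBuildOccs_aux t pcs PySem.Dict.empty [] (fun c occ h => by
    simp [PySem.Dict.get?, PySem.Dict.empty] at h)]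
  simp

lemma sbOcc_sorted_le (t c : List Char) : (sbOcc t c).Pairwise (fun x1 x2 => x1 ≤ x2) :=
  (sbOcc_pairwise t c).imp le_of_lt

-- forward per-string step: bisectLeft on the occurrence list computes text.find(c, bound)
lemma fwd_step (t c : List Char) (bound : Int) (h0 : 0 ≤ bound) (hn : bound ≤ (t.length : Int)) :
    (PySem.Chars.findFrom t c bound = -1 →
      PySem.List.bisectLeft (sbOcc t c) bound = (sbOcc t c).length) ∧
    (PySem.Chars.findFrom t c bound ≠ -1 →
      PySem.List.bisectLeft (sbOcc t c) bound < (sbOcc t c).length ∧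
      (sbOcc t c).getD (PySem.List.bisectLeft (sbOcc t c) bound) 0 = PySem.Chars.findFrom t c bound ∧
      bound ≤ PySem.Chars.findFrom t c bound ∧ PySem.Chars.findFrom t c bound ≤ (t.length : Int)) := by
  obtain ⟨k, hk⟩ : ∃ k : Nat, bound = (k : Int) := ⟨bound.toNat, by omega⟩
  subst hk
  have hkn : k ≤ t.length := by exact_mod_cast hn
  obtain ⟨hj1, hj2, hj3⟩ := PySem.List.bisectLeft_spec (sbOcc t c) (k : Int) (sbOcc_sorted_le t c)
  set occ := sbOcc t c with hocc
  set j := PySem.List.bisectLeft occ (k : Int) with hj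
  have hpw : occ.Pairwise (· < ·) := by rw [hocc]; exact sbOcc_pairwise t c
  constructor
  · intro hneg
    rw [PySem.Chars.findFrom_natCast_eq_neg_one_iff t c k hkn] at hneg
    by_contra hne
    have hjlt : j < occ.length := by omega
    have hmem : occ[j] ∈ occ := List.getElem_mem hjlt
    have hb := hj3 j hjlt le_rfl
    obtain ⟨hp0, hplen, hppre⟩ := mem_sbOcc.mp hmem
    apply hneg
    rw [← PySem.Chars.isIn_iff_infix, ← PySem.Chars.exists_prefix_drop_iff_isIn]
    refine ⟨occ[j].toNat - k, ?_⟩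
    rw [List.drop_drop]
    have : k + (occ[j].toNat - k) = occ[j].toNat := by omega
    rw [this]
    exact hppre
  · intro hpos
    set r := PySem.Chars.findFrom t c (k : Int) with hr
    obtain ⟨hkr, hpre, hmin⟩ := PySem.Chars.findFrom_natCast_spec t c k hkn hpos
    have hrn : r ≤ (t.length : Int) := by
      rw [hr, PySem.Chars.findFrom_natCast t c k hkn]
      split
      · omega
      · have h1 := PySem.Chars.find_le_length (t.drop k) c
        rw [List.length_drop] at h1
        push_cast at h1 ⊢
        omega
    have hrmem : r ∈ occ := by
      rw [hocc, mem_sbOcc]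
      refine ⟨by omega, ?_, hpre⟩
      have := hpre.length_le
      rw [List.length_drop] at this
      omega
    obtain ⟨i0, hi0lt, hi0⟩ := List.mem_iff_getElem.mp hrmem
    have hjlt : j < occ.length := by
      rcases Nat.lt_or_ge j occ.length with h | h
      · exact h
      · exfalso
        have := hj2 i0 hi0lt (by omega)
        omega
    have hble := hj3 j hjlt le_rfl
    have hmemj : occ[j] ∈ occ := List.getElem_mem hjlt
    obtain ⟨hq0, hqlen, hqpre⟩ := mem_sbOcc.mp hmemj
    have hge : r ≤ occ[j] := by
      by_contra hlt
      push_neg at hlt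
      exact hmin occ[j].toNat (by omega) (by omega) hqpre
    have hle : occ[j] ≤ r := by
      rcases Nat.lt_or_ge i0 j with h | h
      · exact absurd (hj2 i0 hi0lt h) (by omega)
      · rcases Nat.eq_or_lt_of_le h with h' | h'
        · exact le_of_eq (by simp only [h', hi0])
        · have := (List.pairwise_iff_getElem.mp hpw) j i0 hjlt hi0lt h'
          rw [hi0] at this
          omega
    refine ⟨hjlt, ?_, by omega, hrn⟩
    rw [List.getD_eq_getElem occ 0 hjlt]
    omega

-- rfind.go unfolding equations
lemma rfind_go_zero (s sub : List Char) :
    PySem.Chars.rfind.go s sub 0 = if sub.isPrefixOf s then 0 else -1 := rfl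

lemma rfind_go_succ (s sub : List Char) (j : Nat) :
    PySem.Chars.rfind.go s sub (j+1) =
      if sub.isPrefixOf (s.drop (j+1)) then ((j:Int)+1) else PySem.Chars.rfind.go s sub j := by
  rfl

-- rfind.go characterisation (negative case)
lemma rfind_go_neg (s sub : List Char) (j : Nat) :
    PySem.Chars.rfind.go s sub j = -1 ↔ ∀ i ≤ j, ¬ sub <+: s.drop i := by
  induction j with
  | zero =>
    rw [rfind_go_zero]
    by_cases hp : sub.isPrefixOf s
    · simp only [if_pos hp]
      constructor
      · intro h; exact absurd h (by norm_num)
      · intro h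
        exact absurd (by simpa [List.isPrefixOf_iff_prefix] using hp) (by simpa using h 0 le_rfl)
    · simp only [if_neg hp]
      constructor
      · intro _ i hi
        interval_cases i
        simpa [List.isPrefixOf_iff_prefix] using hp
      · intro _; trivial
  | succ j ih =>
    rw [rfind_go_succ]
    by_cases hp : sub.isPrefixOf (s.drop (j+1))
    · simp only [if_pos hp]
      constructor
      · intro h; exact absurd h (by omega)
      · intro h
        exact absurd (by simpa [List.isPrefixOf_iff_prefix] using hp) (h (j+1) le_rfl)
    · simp only [if_neg hp]
      rw [ih]
      constructor
      · intro h i hi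
        rcases Nat.lt_or_ge i (j+1) with hlt | hge
        · exact h i (by omega)
        · have : i = j+1 := by omega
          subst this
          simpa [List.isPrefixOf_iff_prefix] using hp
      · intro h i hi
        exact h i (by omega)

-- rfind.go characterisation (positive case)
lemma rfind_go_pos (s sub : List Char) (j : Nat) (h : PySem.Chars.rfind.go s sub j ≠ -1) :
    0 ≤ PySem.Chars.rfind.go s sub j ∧ (PySem.Chars.rfind.go s sub j).toNat ≤ j ∧
    sub <+: s.drop (PySem.Chars.rfind.go s sub j).toNat ∧
    ∀ i, (PySem.Chars.rfind.go s sub j).toNat < i → i ≤ j → ¬ sub <+: s.drop i := by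
  induction j with
  | zero =>
    rw [rfind_go_zero] at h ⊢
    by_cases hp : sub.isPrefixOf s
    · simp only [if_pos hp]
      refine ⟨le_rfl, by simp, ?_, fun i hi hi2 => by omega⟩
      simpa [List.isPrefixOf_iff_prefix] using hp
    · simp [hp] at h
  | succ j ih =>
    rw [rfind_go_succ] at h ⊢
    by_cases hp : sub.isPrefixOf (s.drop (j+1))
    · simp only [if_pos hp]
      have ht : ((j:Int)+1).toNat = j+1 := by omega
      refine ⟨by omega, by omega, ?_, ?_⟩
      · rw [ht]; simpa [List.isPrefixOf_iff_prefix] using hp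
      · intro i hi hi2
        rw [ht] at hi
        omega
    · simp only [if_neg hp] at h ⊢
      obtain ⟨h0, hle, hpre, hmax⟩ := ih h
      refine ⟨h0, by omega, hpre, ?_⟩
      intro i hi hi2
      rcases Nat.lt_or_ge i (j+1) with hlt | hge
      · exact hmax i hi (by omega)
      · have : i = j+1 := by omega
        subst this
        simpa [List.isPrefixOf_iff_prefix] using hp

lemma seg_eq (t : List Char) (start ml : Int) (hs : 0 ≤ start) (hm : 0 ≤ ml) :
    PySem.Chars.slice t (some start) (some (start + ml)) =
      (t.drop start.toNat).take ml.toNat := by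
  rw [PySem.Chars.slice_eq_listSlice, PySem.List.slice_toNat t hs (by omega)]
  congr 1
  omega

lemma seg_len (t : List Char) (start ml : Int) (hs : 0 ≤ start) (hm : 0 ≤ ml)
    (hn : start + ml ≤ (t.length : Int)) :
    (PySem.Chars.slice t (some start) (some (start + ml))).length = ml.toNat := by
  rw [seg_eq t start ml hs hm, List.length_take, List.length_drop]
  omega

lemma seg_drop_prefix_iff (t c : List Char) (start ml : Int) (hs : 0 ≤ start) (hm : 0 ≤ ml)
    (q : Nat) (hq : q ≤ ml.toNat) :
    c <+: (PySem.Chars.slice t (some start) (some (start + ml))).drop q ↔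
      (c <+: t.drop (start.toNat + q) ∧ q + c.length ≤ ml.toNat) := by
  rw [seg_eq t start ml hs hm, List.drop_take, List.drop_drop, List.prefix_take_iff]
  constructor <;> (rintro ⟨h1, h2⟩; exact ⟨h1, by omega⟩)

-- backward per-string step: bisectRight computes segment.rfind(c), shifted by start
lemma bwd_step (t c : List Char) (start ml : Int) (hs : 0 ≤ start) (hm : 0 ≤ ml)
    (hn : start + ml ≤ (t.length : Int)) :
    (PySem.Chars.rfind (PySem.Chars.slice t (some start) (some (start + ml))) c = -1 →
      ¬ (1 ≤ PySem.List.bisectRight (sbOcc t c) (start + ml - (c.length : Int)) ∧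
         start ≤ (sbOcc t c).getD (PySem.List.bisectRight (sbOcc t c) (start + ml - (c.length : Int)) - 1) 0)) ∧
    (PySem.Chars.rfind (PySem.Chars.slice t (some start) (some (start + ml))) c ≠ -1 →
      0 ≤ PySem.Chars.rfind (PySem.Chars.slice t (some start) (some (start + ml))) c ∧
      1 ≤ PySem.List.bisectRight (sbOcc t c) (start + ml - (c.length : Int)) ∧
      (sbOcc t c).getD (PySem.List.bisectRight (sbOcc t c) (start + ml - (c.length : Int)) - 1) 0 =
        start + PySem.Chars.rfind (PySem.Chars.slice t (some start) (some (start + ml))) c) := by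
  obtain ⟨hj1, hj2, hj3⟩ := PySem.List.bisectRight_spec (sbOcc t c)
    (start + ml - (c.length : Int)) (sbOcc_sorted_le t c)
  set occ := sbOcc t c with hocc
  set j := PySem.List.bisectRight occ (start + ml - (c.length : Int)) with hjdef
  set seg := PySem.Chars.slice t (some start) (some (start + ml)) with hseg
  have hpw : occ.Pairwise (· < ·) := by rw [hocc]; exact sbOcc_pairwise t c
  have hsegl : seg.length = ml.toNat := seg_len t start ml hs hm hn
  have hrw : PySem.Chars.rfind seg c = PySem.Chars.rfind.go seg c ml.toNat := by
    rw [PySem.Chars.rfind, hsegl]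
  constructor
  · intro hneg
    rw [hrw, rfind_go_neg] at hneg
    rintro ⟨h1j, hvge⟩
    have hjm : j - 1 < occ.length := by omega
    set v := occ[j-1] with hv
    rw [List.getD_eq_getElem occ 0 hjm, ← hv] at hvge
    have hvle : v ≤ start + ml - (c.length : Int) := hj2 (j-1) hjm (by omega)
    obtain ⟨hv0, hvlen, hvpre⟩ := mem_sbOcc.mp (hv ▸ List.getElem_mem hjm)
    have hq : v.toNat - start.toNat ≤ ml.toNat := by omega
    apply hneg (v.toNat - start.toNat) hq
    rw [seg_drop_prefix_iff t c start ml hs hm _ hq]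
    have : start.toNat + (v.toNat - start.toNat) = v.toNat := by omega
    rw [this]
    exact ⟨hvpre, by omega⟩
  · intro hpos
    rw [hrw] at hpos ⊢
    set rr := PySem.Chars.rfind.go seg c ml.toNat with hrr
    obtain ⟨h0, hle, hpre, hmax⟩ := rfind_go_pos seg c ml.toNat hpos
    rw [← hrr] at *
    rw [seg_drop_prefix_iff t c start ml hs hm _ hle] at hpre
    obtain ⟨hpre, hfit⟩ := hpre
    have hpmem : (start + rr) ∈ occ := by
      rw [hocc, mem_sbOcc]
      refine ⟨by omega, by omega, ?_⟩
      have : (start + rr).toNat = start.toNat + rr.toNat := by omega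
      rw [this]
      exact hpre
    obtain ⟨ip, hiplt, hip⟩ := List.mem_iff_getElem.mp hpmem
    have hple : start + rr ≤ start + ml - (c.length : Int) := by omega
    have hipj : ip < j := by
      rcases Nat.lt_or_ge ip j with h | h
      · exact h
      · exact absurd (hj3 ip hiplt h) (by omega)
    have h1j : 1 ≤ j := by omega
    have hjm : j - 1 < occ.length := by omega
    set v := occ[j-1] with hv
    have hvle : v ≤ start + ml - (c.length : Int) := hj2 (j-1) hjm (by omega)
    have hvgep : start + rr ≤ v := by
      rcases Nat.eq_or_lt_of_le (by omega : ip ≤ j - 1) with h | h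
      · exact le_of_eq (by simp only [hv, ← h, hip])
      · have := (List.pairwise_iff_getElem.mp hpw) ip (j-1) hiplt hjm h
        rw [hip] at this
        omega
    have hveq : v = start + rr := by
      by_contra hne
      have hvgt : start + rr < v := by omega
      obtain ⟨hv0, hvlen, hvpre⟩ := mem_sbOcc.mp (hv ▸ List.getElem_mem hjm)
      have hq : v.toNat - start.toNat ≤ ml.toNat := by omega
      apply hmax (v.toNat - start.toNat) (by omega) hq
      rw [seg_drop_prefix_iff t c start ml hs hm _ hq]
      have : start.toNat + (v.toNat - start.toNat) = v.toNat := by omega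
      rw [this]
      exact ⟨hvpre, by omega⟩
    refine ⟨h0, h1j, ?_⟩
    rw [List.getD_eq_getElem occ 0 hjm, ← hv, hveq]

-- B's forward fold step / backward fold step, named (proof-side only)
def sbFwdStep (t : List Char) (bound : Int) (fwd : Int) (c : List Char) : Int :=
  if PySem.List.bisectLeft (sbOcc t c) bound < (sbOcc t c).length ∧
     (sbOcc t c).getD (PySem.List.bisectLeft (sbOcc t c) bound) 0 < fwd
  then (sbOcc t c).getD (PySem.List.bisectLeft (sbOcc t c) bound) 0 else fwd

def sbBwdStep (t : List Char) (start bound : Int) (back : Int) (c : List Char) : Int :=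
  if 1 ≤ PySem.List.bisectRight (sbOcc t c) (bound - (c.length : Int)) ∧
     start ≤ (sbOcc t c).getD (PySem.List.bisectRight (sbOcc t c) (bound - (c.length : Int)) - 1) 0 ∧
     back < (sbOcc t c).getD (PySem.List.bisectRight (sbOcc t c) (bound - (c.length : Int)) - 1) 0
  then (sbOcc t c).getD (PySem.List.bisectRight (sbOcc t c) (bound - (c.length : Int)) - 1) 0
  else back

-- A's backward fold step, named (proof-side only)
def sbLastStep (t : List Char) (start ml : Int) (li : Int) (c : List Char) : Int :=
  if li < PySem.Chars.rfind (PySem.Chars.slice t (some start) (some (start + ml))) c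
  then PySem.Chars.rfind (PySem.Chars.slice t (some start) (some (start + ml))) c else li

lemma sbSegLast_eq (t : List Char) (ml : Int) (pcs : List (List Char)) (start : Int) :
    sbSegLast t ml pcs start = pcs.foldl (sbLastStep t start ml) (-1) := rfl

-- sbFwd/sbBwd over the mapped occurrence pairs are folds of the named steps over pcs
lemma sbFwd_norm_aux (t : List Char) (bound : Int) :
    ∀ (pcs : List (List Char)) (acc : Int),
      List.foldl
        (fun fwd oc =>
          let j := PySem.List.bisectLeft oc.2 bound
          if j < oc.2.length ∧ oc.2.getD j 0 < fwd then oc.2.getD j 0 else fwd)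
        acc (pcs.map (fun c => (c.length, sbOcc t c))) =
      List.foldl (sbFwdStep t bound) acc pcs := by
  intro pcs
  induction pcs with
  | nil => intro acc; rfl
  | cons c pcs ih =>
    intro acc
    simp only [List.map_cons, List.foldl_cons]
    exact ih _

lemma sbFwd_norm (t : List Char) (bound : Int) (pcs : List (List Char)) :
    sbFwd (pcs.map (fun c => (c.length, sbOcc t c))) (t.length : Int) bound =
      List.foldl (sbFwdStep t bound) ((t.length : Int) + 1) pcs := by
  unfold sbFwd
  exact sbFwd_norm_aux t bound pcs _

lemma sbBwd_norm_aux (t : List Char) (start bound : Int) :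
    ∀ (pcs : List (List Char)) (acc : Int),
      List.foldl
        (fun back (oc : Nat × List Int) =>
          let j := PySem.List.bisectRight oc.2 (bound - (oc.1 : Int))
          if 1 ≤ j ∧ start ≤ oc.2.getD (j - 1) 0 ∧ back < oc.2.getD (j - 1) 0
          then oc.2.getD (j - 1) 0 else back)
        acc (pcs.map (fun c => (c.length, sbOcc t c))) =
      List.foldl (sbBwdStep t start bound) acc pcs := by
  intro pcs
  induction pcs with
  | nil => intro acc; rfl
  | cons c pcs ih =>
    intro acc
    simp only [List.map_cons, List.foldl_cons]
    exact ih _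

lemma sbBwd_norm (t : List Char) (start bound : Int) (pcs : List (List Char)) :
    sbBwd (pcs.map (fun c => (c.length, sbOcc t c))) start bound =
      List.foldl (sbBwdStep t start bound) (-1) pcs := by
  unfold sbBwd
  exact sbBwd_norm_aux t start bound pcs _

-- B's forward fold is the plain running minimum over A's candidate list
lemma fwdB_min (t : List Char) (bound : Int) (h0 : 0 ≤ bound) (hn : bound ≤ (t.length : Int)) :
    ∀ (pcs : List (List Char)) (acc : Int),
      List.foldl (sbFwdStep t bound) acc pcs =
        List.foldl min acc
          ((pcs.map (fun c => PySem.Chars.findFrom t c bound)).filter (fun i => i ≠ -1)) := by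
  intro pcs
  induction pcs with
  | nil => intro acc; rfl
  | cons c pcs ih =>
    intro acc
    simp only [List.map_cons, List.filter_cons, List.foldl_cons]
    by_cases hc : PySem.Chars.findFrom t c bound = -1
    · have hstep : sbFwdStep t bound acc c = acc := by
        unfold sbFwdStep
        rw [if_neg]
        rw [(fwd_step t c bound h0 hn).1 hc]
        omega
      rw [hstep, if_neg (by simp [hc])]
      exact ih acc
    · obtain ⟨hjlt, hgd, hbm, hmn⟩ := (fwd_step t c bound h0 hn).2 hc
      have hstep : sbFwdStep t bound acc c = min acc (PySem.Chars.findFrom t c bound) := by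
        unfold sbFwdStep
        rcases lt_or_ge (PySem.Chars.findFrom t c bound) acc with hlt | hge
        · rw [if_pos ⟨hjlt, by omega⟩, hgd, min_eq_right (by omega)]
        · rw [if_neg (by rw [hgd]; omega), min_eq_left (by omega)]
      rw [hstep, if_pos (by simp [hc]), List.foldl_cons]
      exact ih _

-- every surviving candidate is a real find result, bounded by [bound, len]
lemma mem_fids_bounds (t : List Char) (pcs : List (List Char)) (bound : Int)
    (h0 : 0 ≤ bound) (hn : bound ≤ (t.length : Int)) {y : Int}
    (hy : y ∈ (pcs.map (fun c => PySem.Chars.findFrom t c bound)).filter (fun i => i ≠ -1)) :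
    bound ≤ y ∧ y ≤ (t.length : Int) := by
  rw [List.mem_filter] at hy
  obtain ⟨hy1, hy2⟩ := hy
  rw [List.mem_map] at hy1
  obtain ⟨c, _, rfl⟩ := hy1
  have hne : PySem.Chars.findFrom t c bound ≠ -1 := by simpa using hy2
  obtain ⟨_, _, hb, hl⟩ := (fwd_step t c bound h0 hn).2 hne
  exact ⟨hb, hl⟩

-- the forward searches of A and B agree
lemma fwd_eq (t : List Char) (ml : Int) (pcs : List (List Char)) (start : Int)
    (h0 : 0 ≤ start + ml) (hn : start + ml ≤ (t.length : Int)) :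
    (sbMinFwd t ml pcs start = none ∧
      sbFwd (pcs.map (fun c => (c.length, sbOcc t c))) (t.length : Int) (start + ml) =
        (t.length : Int) + 1) ∨
    (∃ m, sbMinFwd t ml pcs start = some m ∧
      sbFwd (pcs.map (fun c => (c.length, sbOcc t c))) (t.length : Int) (start + ml) = m ∧
      start + ml ≤ m ∧ m ≤ (t.length : Int)) := by
  have hB := sbFwd_norm t (start + ml) pcs
  rw [fwdB_min t (start + ml) h0 hn pcs _] at hB
  unfold sbMinFwd
  cases hfid : (pcs.map (fun c => PySem.Chars.findFrom t c (start + ml))).filter (fun i => i ≠ -1) with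
  | nil =>
    left
    constructor
    · rw [PySem.List.min?_eq_none_iff]
    · rw [hB, hfid]
      rfl
  | cons x rest =>
    right
    have hx : x ∈ (pcs.map (fun c => PySem.Chars.findFrom t c (start + ml))).filter (fun i => i ≠ -1) := by
      rw [hfid]; exact List.mem_cons_self
    have hxb := mem_fids_bounds t pcs (start + ml) h0 hn hx
    refine ⟨rest.foldl min x, ?_, ?_, ?_⟩
    · rw [PySem.List.min?_id_cons]
    · rw [hB, hfid, List.foldl_cons, min_eq_right (by omega)]
    · have hmem : rest.foldl min x ∈ x :: rest :=
        PySem.List.min?_mem (xs := x :: rest) (key := fun y => y)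
          (by rw [PySem.List.min?_id_cons])
      have hmem2 : rest.foldl min x ∈ (pcs.map (fun c => PySem.Chars.findFrom t c (start + ml))).filter (fun i => i ≠ -1) := by
        rw [hfid]; exact hmem
      exact mem_fids_bounds t pcs (start + ml) h0 hn hmem2

-- the backward searches of A and B agree (shifted by start)
lemma bwd_fold_aux (t : List Char) (start ml : Int) (hs : 0 ≤ start) (hm : 0 ≤ ml)
    (hn : start + ml ≤ (t.length : Int)) :
    ∀ (pcs : List (List Char)) (accA accB : Int),
      ((accA = -1 ∧ accB = -1) ∨ (∃ li, 0 ≤ li ∧ accA = li ∧ accB = start + li)) →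
      ((pcs.foldl (sbLastStep t start ml) accA = -1 ∧
        pcs.foldl (sbBwdStep t start (start + ml)) accB = -1) ∨
       (∃ li, 0 ≤ li ∧ pcs.foldl (sbLastStep t start ml) accA = li ∧
        pcs.foldl (sbBwdStep t start (start + ml)) accB = start + li)) := by
  intro pcs
  induction pcs with
  | nil => intro accA accB h; simpa using h
  | cons c pcs ih =>
    intro accA accB h
    rw [List.foldl_cons, List.foldl_cons]
    apply ih
    by_cases hA : PySem.Chars.rfind (PySem.Chars.slice t (some start) (some (start + ml))) c = -1
    · have hno := (bwd_step t c start ml hs hm hn).1 hA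
      have hstepB : ∀ back : Int, sbBwdStep t start (start + ml) back c = back := by
        intro back
        unfold sbBwdStep
        rw [if_neg]
        rintro ⟨hc1, hc2, _⟩
        exact hno ⟨hc1, hc2⟩
      have hstepA : ∀ li : Int, -1 ≤ li → sbLastStep t start ml li c = li := by
        intro li hli
        unfold sbLastStep
        rw [hA, if_neg (by omega)]
      rcases h with ⟨h1, h2⟩ | ⟨lii, hli, h1, h2⟩
      · rw [h1, h2, hstepA _ (by omega), hstepB]
        exact Or.inl ⟨rfl, rfl⟩
      · rw [h1, h2, hstepA _ (by omega), hstepB]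
        exact Or.inr ⟨lii, hli, rfl, rfl⟩
    · obtain ⟨hrr0, h1j, hget⟩ := (bwd_step t c start ml hs hm hn).2 hA
      set rr := PySem.Chars.rfind (PySem.Chars.slice t (some start) (some (start + ml))) c with hrr
      rcases h with ⟨h1, h2⟩ | ⟨lii, hli, h1, h2⟩
      · rw [h1, h2]
        unfold sbLastStep sbBwdStep
        rw [← hrr, if_pos (by omega), if_pos ⟨h1j, by omega, by omega⟩, hget]
        exact Or.inr ⟨rr, hrr0, rfl, rfl⟩
      · rw [h1, h2]
        unfold sbLastStep sbBwdStep
        rw [← hrr]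
        by_cases hlt : lii < rr
        · rw [if_pos hlt, if_pos ⟨h1j, by omega, by omega⟩, hget]
          exact Or.inr ⟨rr, hrr0, rfl, rfl⟩
        · rw [if_neg hlt, if_neg (by rw [hget]; rintro ⟨_, _, _⟩; omega)]
          exact Or.inr ⟨lii, hli, rfl, rfl⟩

lemma bwd_eq (t : List Char) (ml : Int) (pcs : List (List Char)) (start : Int)
    (hs : 0 ≤ start) (hm : 0 ≤ ml) (hn : start + ml ≤ (t.length : Int)) :
    (sbSegLast t ml pcs start = -1 ∧
      sbBwd (pcs.map (fun c => (c.length, sbOcc t c))) start (start + ml) = -1) ∨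
    (∃ li, 0 ≤ li ∧ sbSegLast t ml pcs start = li ∧
      sbBwd (pcs.map (fun c => (c.length, sbOcc t c))) start (start + ml) = start + li) := by
  rw [sbSegLast_eq, sbBwd_norm]
  exact bwd_fold_aux t start ml hs hm hn pcs (-1) (-1) (Or.inl ⟨rfl, rfl⟩)

-- entries with an empty occurrence list are inert in both folds, so filtering them out
-- does not change sbFwd/sbBwd
lemma sbFwd_filter_aux (n bound : Int) :
    ∀ (occs : List (Nat × List Int)) (acc : Int),
      List.foldl
        (fun fwd oc =>
          let j := PySem.List.bisectLeft oc.2 bound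
          if j < oc.2.length ∧ oc.2.getD j 0 < fwd then oc.2.getD j 0 else fwd)
        acc (occs.filter (fun oc => !oc.2.isEmpty)) =
      List.foldl
        (fun fwd oc =>
          let j := PySem.List.bisectLeft oc.2 bound
          if j < oc.2.length ∧ oc.2.getD j 0 < fwd then oc.2.getD j 0 else fwd)
        acc occs := by
  intro occs
  induction occs with
  | nil => intro acc; rfl
  | cons oc rest ih =>
    intro acc
    by_cases hq : oc.2.isEmpty
    · rw [List.filter_cons, if_neg (by simp [hq]), List.foldl_cons, ih]
      congr 1
      rw [List.isEmpty_iff] at hq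
      rw [if_neg]
      rw [hq]
      rintro ⟨h1, _⟩
      simp at h1
    · rw [List.filter_cons, if_pos (by simp [hq]), List.foldl_cons, List.foldl_cons, ih]

lemma sbFwd_filter (occs : List (Nat × List Int)) (n bound : Int) :
    sbFwd (occs.filter (fun oc => !oc.2.isEmpty)) n bound = sbFwd occs n bound := by
  unfold sbFwd
  exact sbFwd_filter_aux n bound occs _

lemma sbBwd_filter_aux (start bound : Int) :
    ∀ (occs : List (Nat × List Int)) (acc : Int),
      List.foldl
        (fun back (oc : Nat × List Int) =>
          let j := PySem.List.bisectRight oc.2 (bound - (oc.1 : Int))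
          if 1 ≤ j ∧ start ≤ oc.2.getD (j - 1) 0 ∧ back < oc.2.getD (j - 1) 0
          then oc.2.getD (j - 1) 0 else back)
        acc (occs.filter (fun oc => !oc.2.isEmpty)) =
      List.foldl
        (fun back (oc : Nat × List Int) =>
          let j := PySem.List.bisectRight oc.2 (bound - (oc.1 : Int))
          if 1 ≤ j ∧ start ≤ oc.2.getD (j - 1) 0 ∧ back < oc.2.getD (j - 1) 0
          then oc.2.getD (j - 1) 0 else back)
        acc occs := by
  intro occs
  induction occs with
  | nil => intro acc; rfl
  | cons oc rest ih =>
    intro acc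
    by_cases hq : oc.2.isEmpty
    · rw [List.filter_cons, if_neg (by simp [hq]), List.foldl_cons, ih]
      congr 1
      rw [List.isEmpty_iff] at hq
      rw [hq]
      have h0 : PySem.List.bisectRight ([] : List Int) (bound - (oc.1 : Int)) = 0 :=
        Nat.le_zero.mp (by
          simpa using (PySem.List.bisectRight_spec ([] : List Int) (bound - (oc.1 : Int))
            List.Pairwise.nil).1)
      rw [if_neg]
      rintro ⟨h1, _⟩
      rw [h0] at h1
      omega
    · rw [List.filter_cons, if_pos (by simp [hq]), List.foldl_cons, List.foldl_cons, ih]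

lemma sbBwd_filter (occs : List (Nat × List Int)) (start bound : Int) :
    sbBwd (occs.filter (fun oc => !oc.2.isEmpty)) start bound = sbBwd occs start bound := by
  unfold sbBwd
  exact sbBwd_filter_aux start bound occs _

-- hence the whole loop ignores the dropped entries
lemma sbLoopB_filter (t : List Char) (ml : Int) (occs : List (Nat × List Int)) :
    ∀ (fuel : Nat) (start : Int) (pieces : List (List Char)),
      sbLoopB t ml (occs.filter (fun oc => !oc.2.isEmpty)) fuel start pieces =
        sbLoopB t ml occs fuel start pieces := by
  intro fuel
  induction fuel with
  | zero => intro start pieces; rfl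
  | succ fuel ih =>
    intro start pieces
    simp only [sbLoopB]
    rw [sbFwd_filter, sbBwd_filter]
    split
    · split
      · rfl
      · split
        · rw [ih]
        · split
          · rw [ih]
          · rfl
    · rfl

-- join with empty separator distributes over cons and append
lemma join_nil_cons (p : List Char) (rest : List (List Char)) :
    PySem.Chars.join [] (p :: rest) = p ++ PySem.Chars.join [] rest := by
  cases rest with
  | nil => simp [PySem.Chars.join_singleton, PySem.Chars.join_nil]
  | cons q r => rw [PySem.Chars.join_cons_cons]; simp

lemma join_nil_append (l1 l2 : List (List Char)) :
    PySem.Chars.join [] (l1 ++ l2) = PySem.Chars.join [] l1 ++ PySem.Chars.join [] l2 := by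
  induction l1 with
  | nil => simp [PySem.Chars.join_nil]
  | cons p r ih => rw [List.cons_append, join_nil_cons, join_nil_cons, ih, List.append_assoc]

-- accumulator lemmas
lemma sbLoopA_acc (t : List Char) (ml : Int) (pcs : List (List Char)) :
    ∀ (fuel : Nat) (start : Int) (res : List Char),
      sbLoopA t ml pcs fuel start res = res ++ sbLoopA t ml pcs fuel start [] := by
  intro fuel
  induction fuel with
  | zero => intro start res; simp [sbLoopA]
  | succ fuel ih =>
    intro start res
    simp only [sbLoopA]
    split
    · split
      · simp
      · split
        · rw [ih _ (res ++ _ ++ pvBr), ih _ ([] ++ _ ++ pvBr)]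
          simp
        · split
          · rw [ih _ (res ++ _ ++ pvBr), ih _ ([] ++ _ ++ pvBr)]
            simp
          · simp
    · simp

lemma sbLoopB_acc (t : List Char) (ml : Int) (occs : List (Nat × List Int)) :
    ∀ (fuel : Nat) (start : Int) (pieces : List (List Char)),
      sbLoopB t ml occs fuel start pieces = pieces ++ sbLoopB t ml occs fuel start [] := by
  intro fuel
  induction fuel with
  | zero => intro start pieces; simp [sbLoopB]
  | succ fuel ih =>
    intro start pieces
    simp only [sbLoopB]
    split
    · split
      · simp
      · split
        · rw [ih _ (pieces ++ _), ih _ ([] ++ _)]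
          simp
        · split
          · rw [ih _ (pieces ++ _), ih _ ([] ++ _)]
            simp
          · simp
    · simp

-- the two loops agree
lemma loop_eq (t : List Char) (ml : Int) (pcs : List (List Char)) (hm : 0 ≤ ml) :
    ∀ (fuel : Nat) (start : Int), 0 ≤ start →
      sbLoopA t ml pcs fuel start [] =
        PySem.Chars.join []
          (sbLoopB t ml (pcs.map (fun c => (c.length, sbOcc t c))) fuel start []) := by
  intro fuel
  induction fuel with
  | zero => intro start _; simp [sbLoopA, sbLoopB, PySem.Chars.join_nil]
  | succ fuel ih =>
    intro start hs
    simp only [sbLoopA, sbLoopB]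
    by_cases h1 : start < (t.length : Int)
    · rw [if_pos h1, if_pos h1]
      by_cases h2 : (t.length : Int) - start ≤ ml
      · rw [if_pos h2, if_pos h2]
        simp [PySem.Chars.join_singleton]
      · rw [if_neg h2, if_neg h2]
        have hb0 : 0 ≤ start + ml := by omega
        have hbn : start + ml ≤ (t.length : Int) := by omega
        rcases fwd_eq t ml pcs start hb0 hbn with ⟨hA, hB⟩ | ⟨m, hA, hB, hbm, hmn⟩
        · simp only [hA, hB]
          rcases bwd_eq t ml pcs start hs hm hbn with ⟨hA2, hB2⟩ | ⟨li, hli, hA2, hB2⟩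
          · simp only [hA2, hB2]
            rw [if_neg (show ¬((-1 : Int) ≠ -1) by simp),
                if_neg (show ¬((t.length : Int) + 1 ≤ (t.length : Int)) by omega),
                if_neg (show ¬((-1 : Int) ≠ -1) by simp)]
            simp [PySem.Chars.join_singleton]
          · simp only [hA2, hB2]
            rw [if_pos (show li ≠ -1 by omega),
                if_neg (show ¬((t.length : Int) + 1 ≤ (t.length : Int)) by omega),
                if_pos (show start + li ≠ -1 by omega)]
            rw [sbLoopA_acc, sbLoopB_acc]
            rw [join_nil_append, ih (start + li + 1) (by omega)]
            simp [join_nil_cons, PySem.Chars.join_nil, List.append_assoc]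
        · simp only [hA, hB]
          rw [if_pos (show m ≤ (t.length : Int) by omega)]
          rw [sbLoopA_acc, sbLoopB_acc]
          rw [join_nil_append, ih (m + 1) (by omega)]
          simp [join_nil_cons, PySem.Chars.join_nil, List.append_assoc]
    · rw [if_neg h1, if_neg h1, PySem.Chars.join_nil]

-- ===== VERDICT (by name: the statement is the Claim_ definition above) =====
theorem soft_break_spec : Claim_equal_soft_break := by
  intro text min_len prefer_chars _hdom hpre
  unfold Spec_soft_break soft_break soft_break_alt
  by_cases hg : text.toList.length = 0 ∨ (text.toList.length : Int) ≤ min_len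
  · rw [if_pos hg, if_pos hg]
  · rw [if_neg hg, if_neg hg]
    have hml : (0 : Int) ≤ min_len := hpre
    rw [sbBuildOccs_eq, sbLoopB_filter,
      loop_eq text.toList min_len (prefer_chars.map String.toList) hml
      (text.toList.length + 1) 0 le_rfl]
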